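-- pv_equiv track=rewrite | github.com/zc0718/req1 | conanfile.py | _pragma_in_import
-- ===== SOURCE A (Python) =====
-- def _pragma_in_import(x: list[str]) -> tuple[bool, int]:
--     # return the pragma once line in conan import wrapper, as its index if exists (-1 if not)
--     _has_pragma, _idx = False, -1
--     for i, _l in enumerate(x):
--         if _l.startswith('#pragma once'):
--             _has_pragma = True
--             _idx = i
--         if _l.strip() == '// Conan::ImportEnd':
--             break
--     return _has_pragma, _idx
-- ===== SOURCE B (Python) =====
-- def _pragma_in_import(x: list[str]) -> tuple[bool, int]:
--     # boundary-then-reverse-scan: find the ImportEnd marker first, then search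
--     # the prefix backwards for the last '#pragma once' line.
--     boundary = len(x)
--     for i, l in enumerate(x):
--         if l.strip() == '// Conan::ImportEnd':
--             boundary = i
--             break
--     for j in range(boundary - 1, -1, -1):
--         if x[j].startswith('#pragma once'):
--             return True, j
--     return False, -1
-- ===== Notes on version B (the rewrite author's own statement) =====
-- stated objective: alternative
-- what changed: Replaces the single fused forward pass carrying (has_pragma, idx) state with a two-phase decomposition: first locate the ImportEnd boundary, then scan the prefix backwards and return at the first (i.e. last) pragma line, with no accumulator state.
import Mathlib
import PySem

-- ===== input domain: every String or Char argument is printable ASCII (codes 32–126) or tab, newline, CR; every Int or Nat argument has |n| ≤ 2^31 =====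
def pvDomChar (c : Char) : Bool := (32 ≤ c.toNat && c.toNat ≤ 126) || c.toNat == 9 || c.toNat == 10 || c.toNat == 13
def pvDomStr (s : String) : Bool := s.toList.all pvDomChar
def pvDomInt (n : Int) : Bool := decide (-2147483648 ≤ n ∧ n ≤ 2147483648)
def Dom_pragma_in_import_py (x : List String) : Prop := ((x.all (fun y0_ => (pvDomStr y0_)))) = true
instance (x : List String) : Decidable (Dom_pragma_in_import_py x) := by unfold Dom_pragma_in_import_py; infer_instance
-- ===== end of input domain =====

-- B replaces A's fused forward pass (accumulator state) with a boundary-then-reverse-scan decomposition; alternative, same cost.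


-- ===== PORT A =====
-- the for-loop over enumerate(x) with its (has_pragma, idx) state and break
def pragmaGoA : List String → Int → Bool → Int → Bool × Int
  | [], _, hp, idx => (hp, idx)
  | l :: rest, i, hp, idx =>
    let hp' := if PySem.Str.startswith l "#pragma once" then true else hp
    let idx' := if PySem.Str.startswith l "#pragma once" then i else idx
    if PySem.Str.strip l == "// Conan::ImportEnd" then (hp', idx')
    else pragmaGoA rest (i + 1) hp' idx'

def pragma_in_import_py (x : List String) : Bool × Int :=
  pragmaGoA x 0 false (-1)

-- ===== PORT B =====
-- phase 1: index of the first ImportEnd marker line, len(x) if none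
def pragmaBoundary : List String → Nat
  | [] => 0
  | l :: rest =>
    if PySem.Str.strip l == "// Conan::ImportEnd" then 0 else pragmaBoundary rest + 1

-- phase 2: the for j in range(boundary-1, -1, -1) loop, as a scan of the
-- reversed enumerated prefix; returns at the first pragma line found
def pragmaRevScan : List (Int × String) → Bool × Int
  | [] => (false, -1)
  | (j, l) :: rest =>
    if PySem.Str.startswith l "#pragma once" then (true, j) else pragmaRevScan rest

def pragma_in_import_py_alt (x : List String) : Bool × Int :=
  pragmaRevScan (((PySem.List.enumerate x 0).take (pragmaBoundary x)).reverse)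

-- ===== PRECONDITION & SPEC =====
def Spec_pragma_in_import_py (x : List String) (out : Bool × Int) : Prop := out = pragma_in_import_py_alt x
instance (x : List String) (out : Bool × Int) : Decidable (Spec_pragma_in_import_py x out) := by unfold Spec_pragma_in_import_py; infer_instance

-- ===== CLAIM (what is proved, stated in full; the proofs are below) =====
def Claim_equal_pragma_in_import_py : Prop := ∀ (x : List String), Dom_pragma_in_import_py x → Spec_pragma_in_import_py x (pragma_in_import_py x)

-- ===== LEMMAS AND PROOFS =====

-- a line that strips to the ImportEnd marker cannot start with '#pragma once'
theorem pragma_marker_disjoint (l : String)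
    (h : (PySem.Str.strip l == ("// Conan::ImportEnd" : String)) = true) :
    PySem.Str.startswith l "#pragma once" = false := by
  by_contra hne
  have hsw : PySem.Chars.startswith l.toList "#pragma once".toList = true := by
    cases hx : PySem.Str.startswith l "#pragma once" with
    | false => exact absurd hx hne
    | true => simpa [PySem.Str.startswith] using hx
  have hpre : "#pragma once".toList <+: l.toList := by
    unfold PySem.Chars.startswith at hsw
    exact List.isPrefixOf_iff_prefix.mp hsw
  obtain ⟨t, ht⟩ := hpre
  have he : PySem.Str.strip l = "// Conan::ImportEnd" := by
    exact eq_of_beq h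
  have hs : PySem.Chars.strip l.toList = "// Conan::ImportEnd".toList := by
    have := congrArg String.toList he
    simpa [PySem.Str.strip] using this
  rw [← ht] at hs
  have hhead : "#pragma once".toList ++ t = '#' :: ("pragma once".toList ++ t) := by
    have : "#pragma once".toList = '#' :: "pragma once".toList := by decide
    rw [this]; rfl
  rw [hhead] at hs
  unfold PySem.Chars.strip PySem.Chars.lstrip PySem.Chars.rstrip at hs
  have hnspace : PySem.Chars.isspace '#' = false := by decide
  rw [List.dropWhile_cons, hnspace] at hs
  simp only [Bool.false_eq_true, if_false] at hs
  have hdw : List.dropWhile PySem.Chars.isspace ('#' :: ("pragma once".toList ++ t)).reverse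
      = ("// Conan::ImportEnd".toList).reverse := by
    have := congrArg List.reverse hs
    simpa using this
  have hsuff : ("// Conan::ImportEnd".toList).reverse <:+ ('#' :: ("pragma once".toList ++ t)).reverse := by
    rw [← hdw]; exact List.dropWhile_suffix _
  have hpre2 : "// Conan::ImportEnd".toList <+: '#' :: ("pragma once".toList ++ t) :=
    List.reverse_suffix.mp hsuff
  obtain ⟨u, hu⟩ := hpre2
  have hm : "// Conan::ImportEnd".toList = '/' :: "/ Conan::ImportEnd".toList := by decide
  rw [hm] at hu
  simp at hu

theorem pragmaRevScan_append (ys : List (Int × String)) (i : Int) (l : String) :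
    pragmaRevScan (ys ++ [(i, l)]) =
      match pragmaRevScan ys with
      | (true, j) => (true, j)
      | (false, _) =>
          if PySem.Str.startswith l "#pragma once" then (true, i) else (false, -1) := by
  induction ys with
  | nil => simp [pragmaRevScan]
  | cons p rest ih =>
    obtain ⟨j0, l0⟩ := p
    by_cases h : PySem.Str.startswith l0 "#pragma once" = true
    · simp at h
      simp [pragmaRevScan, h]
    · simp only [Bool.not_eq_true] at h
      simp at h
      simp [pragmaRevScan, h, ih]

theorem pragmaGoA_eq (x : List String) :
    ∀ (i : Int) (hp : Bool) (idx : Int),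
      pragmaGoA x i hp idx =
        match pragmaRevScan (((PySem.List.enumerate x i).take (pragmaBoundary x)).reverse) with
        | (true, j) => (true, j)
        | (false, _) => (hp, idx) := by
  induction x with
  | nil => intro i hp idx; simp [pragmaGoA, pragmaBoundary, pragmaRevScan, PySem.List.enumerate_nil]
  | cons l rest ih =>
    intro i hp idx
    by_cases hm : (PySem.Str.strip l == ("// Conan::ImportEnd" : String)) = true
    · have hsw := pragma_marker_disjoint l hm
      simp at hsw
      simp [pragmaGoA, pragmaBoundary, pragmaRevScan, hm, hsw]
    · simp only [Bool.not_eq_true] at hm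
      have hstep : pragmaGoA (l :: rest) i hp idx =
          pragmaGoA rest (i + 1)
            (if PySem.Str.startswith l "#pragma once" then true else hp)
            (if PySem.Str.startswith l "#pragma once" then i else idx) := by
        simp [pragmaGoA, hm]
      have htake : ((PySem.List.enumerate (l :: rest) i).take (pragmaBoundary (l :: rest))).reverse
          = ((PySem.List.enumerate rest (i + 1)).take (pragmaBoundary rest)).reverse ++ [(i, l)] := by
        simp [PySem.List.enumerate_cons, pragmaBoundary, hm, List.take_succ_cons]
      rw [hstep, ih, htake, pragmaRevScan_append]
      rcases hys : pragmaRevScan (((PySem.List.enumerate rest (i + 1)).take (pragmaBoundary rest)).reverse) with ⟨b, j⟩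
      cases b
      · by_cases hsw : PySem.Str.startswith l "#pragma once" = true
        · simp at hsw
          simp [hsw]
        · simp only [Bool.not_eq_true] at hsw
          simp at hsw
          simp [hsw]
      · simp

theorem pragmaRevScan_snd_of_false (ys : List (Int × String)) (j : Int)
    (h : pragmaRevScan ys = (false, j)) : j = -1 := by
  induction ys with
  | nil => simpa [pragmaRevScan] using h.symm
  | cons p rest ih =>
    obtain ⟨j0, l0⟩ := p
    by_cases hs : PySem.Str.startswith l0 "#pragma once" = true
    · simp at hs
      simp [pragmaRevScan, hs] at h
    · simp only [Bool.not_eq_true] at hs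
      simp only [pragmaRevScan, hs, Bool.false_eq_true, if_false] at h
      exact ih h

-- ===== VERDICT (by name: the statement is the Claim_ definition above) =====
theorem pragma_in_import_py_spec : Claim_equal_pragma_in_import_py := by
  intro x _
  unfold Spec_pragma_in_import_py pragma_in_import_py pragma_in_import_py_alt
  rw [pragmaGoA_eq]
  rcases h : pragmaRevScan (((PySem.List.enumerate x 0).take (pragmaBoundary x)).reverse) with ⟨b, j⟩
  cases b
  · have := pragmaRevScan_snd_of_false _ _ h
    rw [this]
  · rfl
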